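-- pv_equiv track=rewrite | github.com/QmFkLVBp/decryptoinator | main.py | tokenize_digits_with_mapping
-- ===== SOURCE A (Python) =====
-- from typing import Tuple, List, Optional
--
-- def tokenize_digits_with_mapping(text: str, mapping_keys: set) -> List[Tuple[str, bool]]:
--     """
--     Tokenize text into (token, is_digit_token) with longest-match-first for digits.
--     - If mapping includes 2-digit numeric keys, always attempt a 2-digit match before single-digit.
--     - Non-digit characters are preserved as single-character tokens.
--     - Unmatched digits are preserved as tokens and do not break surrounding text.
--     """
--     tokens: List[Tuple[str, bool]] = []
--     i = 0
--     n = len(text)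
--
--     # Hints for matching strategy
--     has_two_digit_keys = any(k.isdigit() and len(k) == 2 for k in mapping_keys)
--     has_one_digit_keys = any(k.isdigit() and len(k) == 1 for k in mapping_keys)
--
--     while i < n:
--         ch = text[i]
--         if ch.isdigit():
--             # Longest-match-first: try 2-digit match if available
--             if has_two_digit_keys and (i + 1 < n) and text[i + 1].isdigit():
--                 pair = text[i:i + 2]
--                 if pair in mapping_keys:
--                     tokens.append((pair, True))
--                     i += 2
--                     continue
--             # Fallback to single-digit token (mapped or not)
--             tokens.append((ch, True))
--             i += 1
--         else:
--             tokens.append((ch, False))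
--             i += 1
--     return tokens
-- ===== SOURCE B (Python) =====
-- from itertools import groupby
-- from typing import Tuple, List
--
--
-- def tokenize_digits_with_mapping(text: str, mapping_keys: set) -> List[Tuple[str, bool]]:
--     # Staged algorithm: (1) restrict the key set to its two-digit numeric keys;
--     # (2) split the text into maximal runs of digits / non-digits (groupby);
--     # (3) non-digit runs become single-char tokens, digit runs are greedily
--     # paired front-to-back against the restricted key set.
--     keys2 = {k for k in mapping_keys if len(k) == 2 and k.isdigit()}
--     tokens: List[Tuple[str, bool]] = []
--     for is_dig, grp in groupby(text, key=str.isdigit):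
--         run = ''.join(grp)
--         if is_dig:
--             while run:
--                 if run[:2] in keys2:
--                     tokens.append((run[:2], True))
--                     run = run[2:]
--                 else:
--                     tokens.append((run[0], True))
--                     run = run[1:]
--         else:
--             tokens.extend((c, False) for c in run)
--     return tokens
-- ===== Notes on version B (the rewrite author's own statement) =====
-- stated objective: alternative
-- what changed: B replaces A's single index-driven scan (with digit look-ahead and key-hint flags) by a staged algorithm: filter the key set to two-digit numeric keys once, split the text into maximal digit/non-digit runs with itertools.groupby, then map non-digit runs to single-char tokens and greedily pair each digit run against the filtered set.
import Mathlib
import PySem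

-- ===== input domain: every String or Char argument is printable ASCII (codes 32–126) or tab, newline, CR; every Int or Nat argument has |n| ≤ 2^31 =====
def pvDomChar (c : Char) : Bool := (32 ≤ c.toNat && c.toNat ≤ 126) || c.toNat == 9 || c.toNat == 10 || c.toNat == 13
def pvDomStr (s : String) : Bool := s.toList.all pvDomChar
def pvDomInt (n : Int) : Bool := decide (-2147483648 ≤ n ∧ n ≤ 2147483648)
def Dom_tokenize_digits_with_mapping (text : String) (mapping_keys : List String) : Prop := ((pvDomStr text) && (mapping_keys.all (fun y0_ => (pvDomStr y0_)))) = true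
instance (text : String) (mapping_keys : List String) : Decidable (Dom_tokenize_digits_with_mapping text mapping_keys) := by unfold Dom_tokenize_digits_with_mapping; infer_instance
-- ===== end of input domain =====

-- B tokenizes in stages: filter the keys to two-digit numeric ones, split the text
-- into maximal digit/non-digit runs, then emit non-digit runs as single chars and
-- greedily pair digit runs against the filtered keys (objective: alternative).

-- ===== PORT A =====
-- A's while loop; `i` is the index, recursion on the remaining length.
def tokenizeA_loop (cs : List Char) (mapping_keys : List String) (hasTwo : Bool) (i : Nat) :
    List (String × Bool) :=
  if h : i < cs.length then
    let ch := cs[i]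
    if PySem.Chars.isdigit ch then
      -- `has_two_digit_keys and (i + 1 < n) and text[i + 1].isdigit()`
      -- (text[i+1] via pyGet?; the bound check in the conjunction keeps it in range)
      if hasTwo && decide (i + 1 < cs.length)
          && ((PySem.List.pyGet? cs ((i + 1 : Nat) : Int)).any PySem.Chars.isdigit) then
        let pair := String.ofList (PySem.List.slice cs (some (i : Int)) (some ((i + 2 : Nat) : Int)))
        if mapping_keys.contains pair then
          (pair, true) :: tokenizeA_loop cs mapping_keys hasTwo (i + 2)
        else
          (String.ofList [ch], true) :: tokenizeA_loop cs mapping_keys hasTwo (i + 1)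
      else
        (String.ofList [ch], true) :: tokenizeA_loop cs mapping_keys hasTwo (i + 1)
    else
      (String.ofList [ch], false) :: tokenizeA_loop cs mapping_keys hasTwo (i + 1)
  else []
termination_by cs.length - i

def tokenize_digits_with_mapping (text : String) (mapping_keys : List String) :
    List (String × Bool) :=
  let has_two_digit_keys := mapping_keys.any (fun k => PySem.Str.strIsdigit k && (PySem.Str.len k == 2))
  let _has_one_digit_keys := mapping_keys.any (fun k => PySem.Str.strIsdigit k && (PySem.Str.len k == 1))
  tokenizeA_loop text.toList mapping_keys has_two_digit_keys 0

-- ===== PORT B =====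
-- keys2 = {k for k in mapping_keys if len(k) == 2 and k.isdigit()}
def tokenizeB_keys2 (mapping_keys : List String) : List String :=
  PySem.Set.ofList (mapping_keys.filter (fun k => (PySem.Str.len k == 2) && PySem.Str.strIsdigit k))

-- `groupby(text, key=str.isdigit)` — hand port, exact for this use: the list of
-- maximal runs of characters sharing the value of isdigit, each tagged with it.
def pyGroupByDigit (cs : List Char) : List (Bool × List Char) :=
  match cs with
  | [] => []
  | c :: rest =>
    let d := PySem.Chars.isdigit c
    (d, c :: rest.takeWhile (fun x => PySem.Chars.isdigit x == d)) ::
      pyGroupByDigit (rest.dropWhile (fun x => PySem.Chars.isdigit x == d))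
termination_by cs.length
decreasing_by
  simp only [List.length_cons]
  exact Nat.lt_succ_of_le (List.length_dropWhile_le _ _)

-- B's inner while loop over a digit run: greedy pairing against keys2
-- (run[:2] = take 2, run[2:] = drop 1 of the tail, run[1:] = the tail).
def emitDigitRun (run : List Char) (keys2 : List String) : List (String × Bool) :=
  match run with
  | [] => []
  | c :: rest =>
    let pair := String.ofList ((c :: rest).take 2)
    if keys2.contains pair then (pair, true) :: emitDigitRun (rest.drop 1) keys2
    else (String.ofList [c], true) :: emitDigitRun rest keys2
termination_by run.length
decreasing_by
  · simp only [List.length_cons, List.length_drop]; omega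
  · simp

def tokenize_digits_with_mapping_alt (text : String) (mapping_keys : List String) :
    List (String × Bool) :=
  let keys2 := tokenizeB_keys2 mapping_keys
  (pyGroupByDigit text.toList).foldl
    (fun tokens r =>
      if r.1 then tokens ++ emitDigitRun r.2 keys2
      else tokens ++ r.2.map (fun c => (String.ofList [c], false)))
    []

-- ===== PRECONDITION & SPEC =====
def Spec_tokenize_digits_with_mapping (text : String) (mapping_keys : List String) (out : List (String × Bool)) : Prop := out = tokenize_digits_with_mapping_alt text mapping_keys
instance (text : String) (mapping_keys : List String) (out : List (String × Bool)) : Decidable (Spec_tokenize_digits_with_mapping text mapping_keys out) := by unfold Spec_tokenize_digits_with_mapping; infer_instance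

-- ===== CLAIM =====
def Claim_equal_tokenize_digits_with_mapping : Prop := ∀ (text : String) (mapping_keys : List String), Dom_tokenize_digits_with_mapping text mapping_keys → Spec_tokenize_digits_with_mapping text mapping_keys (tokenize_digits_with_mapping text mapping_keys)

-- ===== LEMMAS AND PROOFS =====

-- suffix-form reference for A's loop (merges A's nested conditions value-wise)
def fA (keys : List String) (two : Bool) : List Char → List (String × Bool)
  | [] => []
  | [c] => [(String.ofList [c], PySem.Chars.isdigit c)]
  | c :: d :: tl =>
    if PySem.Chars.isdigit c then
      if two && PySem.Chars.isdigit d && keys.contains (String.ofList [c, d]) then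
        (String.ofList [c, d], true) :: fA keys two tl
      else (String.ofList [c], true) :: fA keys two (d :: tl)
    else (String.ofList [c], false) :: fA keys two (d :: tl)

lemma fA_cons_nondigit (keys : List String) (two : Bool) (c : Char) (xs : List Char)
    (hc : PySem.Chars.isdigit c = false) :
    fA keys two (c :: xs) = (String.ofList [c], false) :: fA keys two xs := by
  cases xs <;> simp [fA, hc]

lemma mem_tokenizeB_keys2 (keys : List String) (s : String) :
    s ∈ tokenizeB_keys2 keys ↔
      s ∈ keys ∧ s.toList.length = 2 ∧ PySem.Chars.strIsdigit s.toList = true := by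
  simp [tokenizeB_keys2, PySem.Set.mem_ofList, List.mem_filter, PySem.Str.len]
  intro _ _
  exact ⟨fun h => by exact_mod_cast h, fun h => by exact_mod_cast h⟩

lemma slice_two (cs : List Char) (i : Nat) :
    PySem.List.slice cs (some (i : Int)) (some ((i + 2 : Nat) : Int)) = (cs.drop i).take 2 := by
  simpa using PySem.List.slice_natCast cs i (i + 2)

lemma take_two_of_lt (cs : List Char) (i : Nat) (h : i + 1 < cs.length) :
    (cs.drop i).take 2 = [cs[i], cs[i + 1]] := by
  have h1 : cs.drop i = cs[i] :: cs.drop (i + 1) := List.drop_eq_getElem_cons (by omega)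
  have h2 : cs.drop (i + 1) = cs[i + 1] :: cs.drop (i + 2) := List.drop_eq_getElem_cons (by omega)
  rw [h1, h2]; rfl

-- A's index loop computes the suffix-form reference
lemma tokenizeA_loop_eq_fA (cs : List Char) (keys : List String) (two : Bool) (i : Nat) :
    tokenizeA_loop cs keys two i = fA keys two (cs.drop i) := by
  by_cases h : i < cs.length
  · have hdrop : cs.drop i = cs[i] :: cs.drop (i + 1) := List.drop_eq_getElem_cons h
    rw [tokenizeA_loop]
    simp only [h, dif_pos]
    by_cases h1 : i + 1 < cs.length
    · have hdrop1 : cs.drop (i + 1) = cs[i + 1] :: cs.drop (i + 2) :=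
        List.drop_eq_getElem_cons h1
      have hget : PySem.List.pyGet? cs ((i + 1 : Nat) : Int) = some cs[i + 1] := by
        rw [PySem.List.pyGet?_natCast cs (i + 1), List.getElem?_eq_getElem h1]
      rw [hdrop, hdrop1, fA]
      by_cases hd : PySem.Chars.isdigit cs[i] = true
      · simp only [hd, if_pos, hget, Option.any_some, slice_two, take_two_of_lt cs i h1]
        by_cases hc : (two && PySem.Chars.isdigit cs[i + 1]
            && keys.contains (String.ofList [cs[i], cs[i + 1]])) = true
        · have hc2 : (two && decide (i + 1 < cs.length) && PySem.Chars.isdigit cs[i+1]) = true := by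
            simp only [Bool.and_eq_true] at hc ⊢
            exact ⟨⟨hc.1.1, by simpa using h1⟩, hc.1.2⟩
          have hk : keys.contains (String.ofList [cs[i], cs[i + 1]]) = true := by
            simp only [Bool.and_eq_true] at hc; exact hc.2
          rw [if_pos hc2, if_pos hk, if_pos hc]
          exact congrArg _ (tokenizeA_loop_eq_fA cs keys two (i + 2))
        · rw [if_neg hc]
          by_cases hc2 : (two && decide (i + 1 < cs.length)
              && PySem.Chars.isdigit cs[i+1]) = true
          · rw [if_pos hc2]
            have hk : ¬ keys.contains (String.ofList [cs[i], cs[i + 1]]) = true := by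
              intro hk
              apply hc
              simp only [Bool.and_eq_true, decide_eq_true_eq] at hc2
              simp only [Bool.and_eq_true]
              exact ⟨⟨hc2.1.1, hc2.2⟩, hk⟩
            rw [if_neg hk]
            exact congrArg _ (by rw [tokenizeA_loop_eq_fA cs keys two (i + 1), hdrop1])
          · rw [if_neg hc2]
            exact congrArg _ (by rw [tokenizeA_loop_eq_fA cs keys two (i + 1), hdrop1])
      · simp only [Bool.not_eq_true] at hd
        simp only [hd, Bool.false_eq_true, if_false]
        exact congrArg _ (by rw [tokenizeA_loop_eq_fA cs keys two (i + 1), hdrop1])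
    · -- last character: i + 1 = length
      have hlast : cs.drop (i + 1) = [] := List.drop_eq_nil_of_le (by omega)
      rw [hdrop, hlast, fA]
      have hc2 : (two && decide (i + 1 < cs.length)
          && ((PySem.List.pyGet? cs ((i + 1 : Nat) : Int)).any PySem.Chars.isdigit)) = false := by
        simp [h1]
      by_cases hd : PySem.Chars.isdigit cs[i] = true
      · simp only [hd, if_pos, hc2, Bool.false_eq_true, if_false]
        rw [tokenizeA_loop_eq_fA cs keys two (i + 1), hlast, fA]
      · simp only [Bool.not_eq_true] at hd
        simp only [hd, Bool.false_eq_true, if_false]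
        rw [tokenizeA_loop_eq_fA cs keys two (i + 1), hlast, fA]
  · have : cs.drop i = [] := List.drop_eq_nil_of_le (by omega)
    rw [tokenizeA_loop, this, fA]
    simp [h]
termination_by cs.length - i

-- fA over a non-digit run peels it off as single (c, false) tokens
lemma fA_nondigit_run (keys : List String) (two : Bool) (run rest : List Char)
    (hr : ∀ c ∈ run, PySem.Chars.isdigit c = false) :
    fA keys two (run ++ rest) = run.map (fun c => (String.ofList [c], false)) ++ fA keys two rest := by
  induction run with
  | nil => simp
  | cons c tl ih =>
    have hc : PySem.Chars.isdigit c = false := hr c (by simp)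
    have htl : ∀ x ∈ tl, PySem.Chars.isdigit x = false := fun x hx => hr x (by simp [hx])
    rw [List.cons_append, fA_cons_nondigit keys two c _ hc, ih htl]
    simp

-- hasTwo is true as soon as some string of keys is a two-digit string
lemma hasTwo_of_mem (keys : List String) (s : String) (hs : s ∈ keys)
    (hlen : s.toList.length = 2) (hdig : PySem.Chars.strIsdigit s.toList = true) :
    (keys.any (fun k => PySem.Str.strIsdigit k && (PySem.Str.len k == 2))) = true :=
  List.any_eq_true.2 ⟨s, hs, by
    simp [PySem.Str.strIsdigit, PySem.Str.len, hdig, hlen]⟩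

-- fA over a maximal digit run is B's greedy pairing of the run
lemma fA_digit_run (keys : List String) (run rest : List Char)
    (hr : ∀ c ∈ run, PySem.Chars.isdigit c = true)
    (hb : ∀ d tl, rest = d :: tl → PySem.Chars.isdigit d = false) :
    fA keys (keys.any (fun k => PySem.Str.strIsdigit k && (PySem.Str.len k == 2))) (run ++ rest)
      = emitDigitRun run (tokenizeB_keys2 keys)
        ++ fA keys (keys.any (fun k => PySem.Str.strIsdigit k && (PySem.Str.len k == 2))) rest := by
  match run with
  | [] => simp [emitDigitRun]
  | [c] =>
    have hc : PySem.Chars.isdigit c = true := hr c (by simp)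
    have hnp : ¬ (tokenizeB_keys2 keys).contains (String.ofList [c]) = true := by
      intro hk
      have := ((mem_tokenizeB_keys2 keys _).1 (List.contains_iff_mem.1 hk)).2.1
      simp at this
    rw [emitDigitRun]
    simp only [List.take, if_neg hnp]
    match rest with
    | [] => simp [fA, hc, emitDigitRun]
    | d :: tl =>
      have hd : PySem.Chars.isdigit d = false := hb d tl rfl
      rw [List.singleton_append]
      simp [fA, hc, hd, emitDigitRun]
  | c :: d :: tl =>
    have hc : PySem.Chars.isdigit c = true := hr c (by simp)
    have hd : PySem.Chars.isdigit d = true := hr d (by simp)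
    have htl : ∀ x ∈ d :: tl, PySem.Chars.isdigit x = true := fun x hx => hr x (by simp at hx; rcases hx with h|h <;> simp [h])
    have htl2 : ∀ x ∈ tl, PySem.Chars.isdigit x = true := fun x hx => hr x (by simp [hx])
    rw [List.cons_append, List.cons_append, fA, emitDigitRun]
    by_cases hk2 : (tokenizeB_keys2 keys).contains (String.ofList ((c :: d :: tl).take 2)) = true
    · have hmem := (mem_tokenizeB_keys2 keys _).1 (List.contains_iff_mem.1 hk2)
      have hkk : keys.contains (String.ofList [c, d]) = true := by
        simpa using List.contains_iff_mem.2 hmem.1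
      have hTwo := hasTwo_of_mem keys _ hmem.1 hmem.2.1 hmem.2.2
      rw [if_pos hk2]
      have hcond : ((keys.any fun k => PySem.Str.strIsdigit k && (PySem.Str.len k == 2))
          && PySem.Chars.isdigit d && keys.contains (String.ofList [c, d])) = true := by
        rw [hTwo, hd, hkk]; rfl
      simp only [hc, if_pos, List.take]
      rw [if_pos hcond, fA_digit_run keys tl rest htl2 hb]
      simp
    · rw [if_neg hk2]
      have hkk : keys.contains (String.ofList [c, d]) = false := by
        by_contra hne
        apply hk2
        simp only [Bool.not_eq_false] at hne
        exact List.contains_iff_mem.2 ((mem_tokenizeB_keys2 keys _).2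
          ⟨List.contains_iff_mem.1 hne, by simp, by simp [PySem.Chars.strIsdigit, hc, hd]⟩)
      simp only [hc, if_pos, hkk, Bool.and_false, Bool.false_eq_true, if_false]
      have ih := fA_digit_run keys (d :: tl) rest htl hb
      rw [List.cons_append] at ih
      rw [ih]
      simp
termination_by run.length

-- the run decomposition: fA equals the flatMap of per-run emission over groupby
lemma fA_eq_flatMap_runs (keys : List String) (cs : List Char) :
    fA keys (keys.any (fun k => PySem.Str.strIsdigit k && (PySem.Str.len k == 2))) cs
      = (pyGroupByDigit cs).flatMap (fun r =>
          if r.1 then emitDigitRun r.2 (tokenizeB_keys2 keys)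
          else r.2.map (fun c => (String.ofList [c], false))) := by
  match cs with
  | [] => simp [pyGroupByDigit, fA]
  | c :: rest =>
    rw [pyGroupByDigit]
    simp only [List.flatMap_cons]
    set p := fun x => PySem.Chars.isdigit x == PySem.Chars.isdigit c with hp
    have hsplit : c :: rest = (c :: rest.takeWhile p) ++ rest.dropWhile p := by
      simp [List.takeWhile_append_dropWhile]
    have hrun : ∀ x ∈ c :: rest.takeWhile p, PySem.Chars.isdigit x = PySem.Chars.isdigit c := by
      intro x hx
      simp only [List.mem_cons] at hx
      rcases hx with h | h
      · rw [h]
      · have := List.mem_takeWhile_imp h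
        simpa [hp] using this
    have hbound : ∀ d tl, rest.dropWhile p = d :: tl → PySem.Chars.isdigit d ≠ PySem.Chars.isdigit c := by
      intro d tl hdt
      have hhd := List.head_dropWhile_not p (l := rest) (by simp [hdt])
      simp only [hdt, List.head_cons] at hhd
      simpa [hp] using hhd
    have ih := fA_eq_flatMap_runs keys (rest.dropWhile p)
    by_cases hcd : PySem.Chars.isdigit c = true
    · simp only [hcd, if_pos]
      rw [hsplit, fA_digit_run keys _ _
            (fun x hx => by rw [hrun x hx, hcd])
            (fun d tl hdt => by have := hbound d tl hdt; rw [hcd] at this; simpa using this),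
          ih]
    · simp only [Bool.not_eq_true] at hcd
      simp only [hcd, Bool.false_eq_true, if_false]
      rw [hsplit, fA_nondigit_run keys _ _ _
            (fun x hx => by rw [hrun x hx, hcd]),
          ih]
termination_by cs.length
decreasing_by
  simp only [List.length_cons]
  exact Nat.lt_succ_of_le (List.length_dropWhile_le _ _)

-- ===== VERDICT =====
theorem tokenize_digits_with_mapping_spec : Claim_equal_tokenize_digits_with_mapping := by
  intro text mapping_keys _
  unfold Spec_tokenize_digits_with_mapping
  unfold tokenize_digits_with_mapping tokenize_digits_with_mapping_alt
  show tokenizeA_loop text.toList mapping_keys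
      (mapping_keys.any (fun k => PySem.Str.strIsdigit k && (PySem.Str.len k == 2))) 0
    = (pyGroupByDigit text.toList).foldl
        (fun tokens r =>
          if r.1 then tokens ++ emitDigitRun r.2 (tokenizeB_keys2 mapping_keys)
          else tokens ++ r.2.map (fun c => (String.ofList [c], false))) []
  rw [tokenizeA_loop_eq_fA, List.drop_zero, fA_eq_flatMap_runs]
  rw [show (fun (tokens : List (String × Bool)) (r : Bool × List Char) =>
        if r.1 then tokens ++ emitDigitRun r.2 (tokenizeB_keys2 mapping_keys)
        else tokens ++ r.2.map (fun c => (String.ofList [c], false)))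
      = (fun tokens r => tokens ++ (if r.1 then emitDigitRun r.2 (tokenizeB_keys2 mapping_keys)
        else r.2.map (fun c => (String.ofList [c], false)))) from by
      funext tokens r; by_cases hr : r.1 <;> simp [hr]]
  rw [PySem.List.foldl_append_eq_flatMap]
  simp
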